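-- pv_equiv track=rewrite | github.com/2522679398/scaling-chainsaw | project_gdp_visualization.py | reconcile_countries_by_name
-- ===== SOURCE A (Python) =====
-- def reconcile_countries_by_name(plot_countries, gdp_countries): #返回在世行有GDP数据的绘图库国家代码字典，以及没有世行GDP数据的国家代码集合
--     """
--     输入参数:
--     plot_countries: 绘图库国家代码数据，字典格式，其中键为绘图库国家代码，值为对应的具体国名
--     gdp_countries:世行各国数据，嵌套字典格式，其中外部字典的键为世行国家代码，值为该国在世行文件中的行数据（字典格式)
--
--     输出：
--     返回元组格式，包括一个字典和一个集合。其中字典内容为在世行有GDP数据的绘图库国家信息（键为绘图库各国家代码，值为对应的具体国名),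
--     集合内容为在世行无GDP数据的绘图库国家代码
--     """
--
--     # 不要忘记返回结果
--
--     set1= set()
--     dict1={}
--     for k,v in plot_countries.items():#分别取出代码和国家名称
--         if v in gdp_countries:#如果字典中含有国家
--             dict1[k] = plot_countries[k]#输入字典
--         else:
--             set1.add(k)#如果不含有则输入集合
--     tuple1 = tuple([dict1,set1])
--     return tuple1#返回元组
-- ===== SOURCE B (Python) =====
-- def reconcile_countries_by_name(plot_countries, gdp_countries):
--     # Divide and conquer over the items: split in half, solve each half,
--     # merge the two dicts and union the two sets.
--     def go(items):
--         if len(items) == 0: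
--             return ({}, set())
--         if len(items) == 1:
--             k, v = items[0]
--             if v in gdp_countries:
--                 return ({k: v}, set())
--             return ({}, {k})
--         mid = len(items) // 2
--         dl, sl = go(items[:mid])
--         dr, sr = go(items[mid:])
--         return ({**dl, **dr}, sl | sr)
--     return go(list(plot_countries.items()))
-- ===== Notes on version B (the rewrite author's own statement) =====
-- stated objective: alternative
-- what changed: Replaces A's single linear if/else accumulation loop by a divide-and-conquer recursion: split the items list in half, solve each half recursively (singleton base case), then merge the two dicts with {**dl, **dr} and union the two sets.
import Mathlib
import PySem

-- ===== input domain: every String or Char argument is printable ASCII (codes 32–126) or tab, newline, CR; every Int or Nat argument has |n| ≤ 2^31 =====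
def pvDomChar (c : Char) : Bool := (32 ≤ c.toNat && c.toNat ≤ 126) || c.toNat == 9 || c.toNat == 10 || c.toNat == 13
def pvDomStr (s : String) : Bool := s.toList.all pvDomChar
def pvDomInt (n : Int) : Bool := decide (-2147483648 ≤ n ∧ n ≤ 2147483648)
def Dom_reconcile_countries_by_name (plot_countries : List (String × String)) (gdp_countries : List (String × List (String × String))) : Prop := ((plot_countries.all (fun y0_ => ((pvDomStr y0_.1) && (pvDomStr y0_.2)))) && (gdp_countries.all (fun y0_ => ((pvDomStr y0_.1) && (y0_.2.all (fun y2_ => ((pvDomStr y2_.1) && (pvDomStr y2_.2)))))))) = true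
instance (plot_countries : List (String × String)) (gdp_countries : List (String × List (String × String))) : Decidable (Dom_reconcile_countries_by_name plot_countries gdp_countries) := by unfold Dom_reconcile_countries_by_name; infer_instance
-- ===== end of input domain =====

-- B replaces A's single if/else accumulation loop by a divide-and-conquer recursion over the
-- items list (split in half, solve the halves, merge dict and set); objective: alternative.

-- ===== PORT A =====
-- The dict parameters arrive as association lists; as in Python they are dicts, so both
-- ports first form the PySem.Dict (insertion order, last value wins) before iterating.
def reconcile_countries_by_name (plot_countries : List (String × String)) (gdp_countries : List (String × List (String × String))) : (List (String × String)) × List String :=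
  let pd : PySem.Dict String String := PySem.Dict.ofList plot_countries
  let gd : PySem.Dict String (List (String × String)) := PySem.Dict.ofList gdp_countries
  -- set1 = set(); dict1 = {}; for k, v in plot_countries.items(): …
  let acc := pd.items.foldl
    (fun (acc : PySem.Dict String String × PySem.Set String) kv =>
      if gd.contains kv.2 then
        -- dict1[k] = plot_countries[k]  (k comes from the dict's own items, so the lookup
        -- cannot raise KeyError; ported as getD with an unreachable default)
        (acc.1.insert kv.1 (pd.getD kv.1 ""), acc.2)
      else
        (acc.1, PySem.Set.add acc.2 kv.1))
    (PySem.Dict.empty, PySem.Set.empty)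
  (acc.1.items, acc.2)

-- ===== PORT B =====
-- def go(items): … divide and conquer (Source B); gd is Python's closed-over gdp_countries dict
def goB (gd : PySem.Dict String (List (String × String))) : List (String × String) → PySem.Dict String String × PySem.Set String
  | [] => (PySem.Dict.empty, PySem.Set.empty)              -- len(items) == 0
  | [kv] =>                                                 -- len(items) == 1
      if gd.contains kv.2 then (PySem.Dict.empty.insert kv.1 kv.2, PySem.Set.empty)
      else (PySem.Dict.empty, PySem.Set.add PySem.Set.empty kv.1)
  | p :: q :: rest =>
      let items := p :: q :: rest
      let mid := items.length / 2
      let L := goB gd (items.take mid)                      -- dl, sl = go(items[:mid])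
      let R := goB gd (items.drop mid)                      -- dr, sr = go(items[mid:])
      -- ({**dl, **dr}, sl | sr)
      (R.1.items.foldl (fun d kv => d.insert kv.1 kv.2) L.1, PySem.Set.union L.2 R.2)
termination_by l => l.length
decreasing_by
  · simp [List.length_take]; omega
  · simp; omega

def reconcile_countries_by_name_alt (plot_countries : List (String × String)) (gdp_countries : List (String × List (String × String))) : (List (String × String)) × List String :=
  let pd : PySem.Dict String String := PySem.Dict.ofList plot_countries
  let gd : PySem.Dict String (List (String × String)) := PySem.Dict.ofList gdp_countries
  let r := goB gd pd.items                                  -- return go(list(plot_countries.items()))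
  (r.1.items, r.2)

-- ===== PRECONDITION & SPEC =====
def Spec_reconcile_countries_by_name (plot_countries : List (String × String)) (gdp_countries : List (String × List (String × String))) (out : (List (String × String)) × List String) : Prop := out = reconcile_countries_by_name_alt plot_countries gdp_countries
instance (plot_countries : List (String × String)) (gdp_countries : List (String × List (String × String))) (out : (List (String × String)) × List String) : Decidable (Spec_reconcile_countries_by_name plot_countries gdp_countries out) := by unfold Spec_reconcile_countries_by_name; infer_instance

-- ===== CLAIM =====
def Claim_equal_reconcile_countries_by_name : Prop := ∀ (plot_countries : List (String × String)) (gdp_countries : List (String × List (String × String))), Dom_reconcile_countries_by_name plot_countries gdp_countries → Spec_reconcile_countries_by_name plot_countries gdp_countries (reconcile_countries_by_name plot_countries gdp_countries)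

-- ===== LEMMAS AND PROOFS =====

-- A's loop over a list of pairs with pairwise-distinct, fresh keys: the dict accumulates
-- exactly the matched pairs in order, the set exactly the unmatched keys in order.
theorem loopA_characterization {ν : Type} [BEq ν] (gd : PySem.Dict String ν)
    (pd : PySem.Dict String String) :
    ∀ (l : List (String × String)) (d1 : PySem.Dict String String) (s1 : PySem.Set String),
    (∀ p ∈ l, pd.getD p.1 "" = p.2) →
    (l.map Prod.fst).Nodup →
    (∀ p ∈ l, d1.contains p.1 = false) →
    (∀ p ∈ l, p.1 ∉ s1) →
    (l.foldl
      (fun (acc : PySem.Dict String String × PySem.Set String) kv =>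
        if gd.contains kv.2 then (acc.1.insert kv.1 (pd.getD kv.1 ""), acc.2)
        else (acc.1, PySem.Set.add acc.2 kv.1)) (d1, s1))
    = (PySem.Dict.mk (d1.items ++ l.filter (fun kv => gd.contains kv.2)),
       s1 ++ (l.filter (fun kv => !gd.contains kv.2)).map Prod.fst) := by
  intro l
  induction l with
  | nil => intro d1 s1 _ _ _ _; simp
  | cons p t ih =>
    intro d1 s1 hget hnd hd1 hs1
    have hgetp : pd.getD p.1 "" = p.2 := hget p (List.mem_cons_self ..)
    have hkey : ∀ q ∈ t, q.1 ≠ p.1 := by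
      intro q hq heq
      have : p.1 ∉ t.map Prod.fst := (List.nodup_cons.mp (by simpa using hnd)).1
      exact this (heq ▸ List.mem_map_of_mem hq)
    by_cases hc : gd.contains p.2 = true
    · simp only [List.foldl_cons, hc, if_pos, List.filter_cons, Bool.not_true]
      rw [ih (d1.insert p.1 (pd.getD p.1 "")) s1
        (fun q hq => hget q (List.mem_cons_of_mem _ hq))
        ((List.nodup_cons.mp (by simpa using hnd)).2)
        (fun q hq => by
          rw [PySem.Dict.contains_insert]
          simp [hkey q hq, hd1 q (List.mem_cons_of_mem _ hq)])
        (fun q hq => hs1 q (List.mem_cons_of_mem _ hq))]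
      rw [PySem.Dict.items_insert_of_not_contains _ _ (hd1 p (List.mem_cons_self ..))]
      simp [hgetp]
    · simp only [List.foldl_cons, hc, if_neg, Bool.not_eq_true, List.filter_cons]
      rw [ih d1 (PySem.Set.add s1 p.1)
        (fun q hq => hget q (List.mem_cons_of_mem _ hq))
        ((List.nodup_cons.mp (by simpa using hnd)).2)
        (fun q hq => hd1 q (List.mem_cons_of_mem _ hq))
        (fun q hq hmem => by
          rcases (PySem.Set.mem_add _ _ _).mp hmem with h | h
          · exact hs1 q (List.mem_cons_of_mem _ hq) h
          · exact hkey q hq h)]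
      have hps : p.1 ∉ s1 := hs1 p (List.mem_cons_self ..)
      have : PySem.Set.add s1 p.1 = s1 ++ [p.1] := by
        simp [PySem.Set.add, PySem.Set.contains]
        intro h; exact absurd h hps
      simp [this]

-- set.update with fresh, pairwise-distinct elements appends them in order
theorem set_update_fresh {α : Type} [BEq α] [LawfulBEq α] :
    ∀ (t s : List α), (∀ x ∈ t, x ∉ s) → t.Nodup →
    PySem.Set.update s t = s ++ t := by
  intro t
  induction t with
  | nil => intro s _ _; simp [PySem.Set.update]
  | cons x r ih =>
    intro s hf hnd
    have hx : x ∉ s := hf x (List.mem_cons_self ..)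
    have hadd : PySem.Set.add s x = s ++ [x] := by
      simp [PySem.Set.add, PySem.Set.contains]
      intro h; exact absurd h hx
    have : PySem.Set.update s (x :: r) = PySem.Set.update (PySem.Set.add s x) r := rfl
    rw [this, hadd, ih (s ++ [x])
      (fun y hy => by
        simp only [List.mem_append, List.mem_singleton]
        rintro (h | h)
        · exact hf y (List.mem_cons_of_mem _ hy) h
        · exact (List.nodup_cons.mp hnd).1 (h ▸ hy))
      (List.nodup_cons.mp hnd).2]
    simp

-- the divide-and-conquer recursion computes the matched pairs and the unmatched keys, in order
theorem goB_characterization (gd : PySem.Dict String (List (String × String))) :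
    ∀ (l : List (String × String)), (l.map Prod.fst).Nodup →
    goB gd l = (PySem.Dict.mk (l.filter (fun kv => gd.contains kv.2)),
                (l.filter (fun kv => !gd.contains kv.2)).map Prod.fst) := by
  intro l
  induction hn : l.length using Nat.strong_induction_on generalizing l with
  | _ n ih =>
  match l with
  | [] => intro _; simp [goB, PySem.Dict.empty, PySem.Set.empty]
  | [kv] =>
    intro _
    by_cases hc : gd.contains kv.2 = true
    · simp only [goB, hc, if_pos, List.filter_cons, List.filter_nil, Bool.not_true]
      refine Prod.ext ?_ (by simp [PySem.Set.empty])
      apply PySem.Dict.ext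
      rw [PySem.Dict.items_insert_of_not_contains _ _ (PySem.Dict.contains_empty kv.1)]
      simp [PySem.Dict.empty]
    · simp only [Bool.not_eq_true] at hc
      simp [goB, hc, PySem.Dict.empty, PySem.Set.add, PySem.Set.empty, PySem.Set.contains]
  | p :: q :: rest =>
    intro hnd
    subst hn
    set l := p :: q :: rest with hl
    set mid := l.length / 2 with hmid
    have hmid1 : 1 ≤ mid := by simp [hmid, hl]; omega
    have hmidlt : mid < l.length := by simp [hmid, hl]; omega
    have hsplit : l.take mid ++ l.drop mid = l := List.take_append_drop ..
    have hndsplit : ((l.take mid).map Prod.fst ++ (l.drop mid).map Prod.fst).Nodup := by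
      rw [← List.map_append, hsplit]; exact hnd
    have hndA : ((l.take mid).map Prod.fst).Nodup := (List.nodup_append.mp hndsplit).1
    have hndB : ((l.drop mid).map Prod.fst).Nodup := (List.nodup_append.mp hndsplit).2.1
    have hdisj : ∀ x ∈ (l.take mid).map Prod.fst, x ∉ (l.drop mid).map Prod.fst := by
      have := (List.nodup_append.mp hndsplit).2.2
      intro x hx hx'
      exact this x hx x hx' rfl
    have hlenA : (l.take mid).length < l.length := by
      rw [List.length_take]; omega
    have hlenB : (l.drop mid).length < l.length := by
      rw [List.length_drop]; omega
    have ihA := ih _ hlenA _ rfl hndA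
    have ihB := ih _ hlenB _ rfl hndB
    have hgo : goB gd l =
        ((goB gd (l.drop mid)).1.items.foldl (fun d kv => d.insert kv.1 kv.2) (goB gd (l.take mid)).1,
         PySem.Set.union (goB gd (l.take mid)).2 (goB gd (l.drop mid)).2) := by
      rw [hl]; rw [goB]
    rw [hgo, ihA, ihB]
    set fA := (l.take mid).filter (fun kv => gd.contains kv.2) with hfA
    set fB := (l.drop mid).filter (fun kv => gd.contains kv.2) with hfB
    set uA := ((l.take mid).filter (fun kv => !gd.contains kv.2)).map Prod.fst with huA
    set uB := ((l.drop mid).filter (fun kv => !gd.contains kv.2)).map Prod.fst with huB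
    have hsubA : ∀ x ∈ fA.map Prod.fst, x ∈ (l.take mid).map Prod.fst := by
      intro x hx
      rcases List.mem_map.mp hx with ⟨a, ha, rfl⟩
      exact List.mem_map_of_mem (List.mem_of_mem_filter ha)
    have hsubB : ∀ x ∈ fB.map Prod.fst, x ∈ (l.drop mid).map Prod.fst := by
      intro x hx
      rcases List.mem_map.mp hx with ⟨a, ha, rfl⟩
      exact List.mem_map_of_mem (List.mem_of_mem_filter ha)
    have hndfB : (fB.map Prod.fst).Nodup := hndB.sublist (List.filter_sublist.map _)
    refine Prod.ext ?_ ?_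
    · dsimp only
      have hfresh : ∀ a ∈ (PySem.Dict.mk fB).items, (PySem.Dict.mk fA).contains a.1 = false := by
        intro a ha
        rw [PySem.Dict.contains_mk]
        rw [List.any_eq_false]
        intro b hb
        simp only [beq_iff_eq]
        intro hba
        exact hdisj _ (hsubA _ (hba ▸ List.mem_map_of_mem hb)) (hsubB _ (List.mem_map_of_mem ha))
      have h := PySem.Dict.items_foldl_insert_fresh (PySem.Dict.mk fB).items Prod.fst Prod.snd
        (PySem.Dict.mk fA) hfresh hndfB
      dsimp only at h
      apply PySem.Dict.ext
      rw [h]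
      have hmapid : List.map (fun a : String × String => (a.1, a.2)) fB = fB := by simp
      rw [hmapid]
      conv_rhs => rw [← hsplit, List.filter_append]
    · dsimp only
      have hsubuA : ∀ x ∈ uA, x ∈ (l.take mid).map Prod.fst := by
        intro x hx
        rcases List.mem_map.mp hx with ⟨a, ha, rfl⟩
        exact List.mem_map_of_mem (List.mem_of_mem_filter ha)
      have hsubuB : ∀ x ∈ uB, x ∈ (l.drop mid).map Prod.fst := by
        intro x hx
        rcases List.mem_map.mp hx with ⟨a, ha, rfl⟩
        exact List.mem_map_of_mem (List.mem_of_mem_filter ha)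
      have hnduB : uB.Nodup := hndB.sublist (List.filter_sublist.map _)
      have h2 : PySem.Set.union uA uB = uA ++ uB :=
        set_update_fresh uB uA
          (fun x hx hx' => hdisj _ (hsubuA _ hx') (hsubuB _ hx)) hnduB
      rw [h2]
      conv_rhs => rw [← hsplit, List.filter_append, List.map_append]

-- ===== VERDICT (by name: the statement is the Claim_ definition above) =====
theorem reconcile_countries_by_name_spec : Claim_equal_reconcile_countries_by_name := by
  intro plot_countries gdp_countries _
  unfold Spec_reconcile_countries_by_name reconcile_countries_by_name reconcile_countries_by_name_alt
  dsimp only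
  set pd : PySem.Dict String String := PySem.Dict.ofList plot_countries with hpd
  set gd : PySem.Dict String (List (String × String)) := PySem.Dict.ofList gdp_countries with hgd
  have hknd : pd.keys.Nodup := PySem.Dict.nodup_keys_ofList plot_countries
  have hnd : (pd.items.map Prod.fst).Nodup := hknd
  rw [loopA_characterization gd pd pd.items PySem.Dict.empty PySem.Set.empty
      (fun p hp => PySem.Dict.getD_of_mem_items pd hp hknd "")
      hnd
      (fun p _ => PySem.Dict.contains_empty p.1)
      (fun p hp => by simp [PySem.Set.empty])]
  rw [goB_characterization gd pd.items hnd]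
  simp [PySem.Dict.empty, PySem.Set.empty]
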